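-- pv_equiv track=rewrite | github.com/Lemidinku/A2SV-G5 | Onboarding/replace-elements-in-an-array.py | arrayChange
-- ===== SOURCE A (Python) =====
-- from typing import List
--
-- def arrayChange(nums: List[int], operations: List[List[int]]) -> List[int]:
--
--     ind_table = {val:i for i,val in enumerate(nums)}
--     for old,new in operations:
--         ind_table[new] = ind_table.pop(old)
--
--     result = [0]*len(nums)
--     for num,ind in ind_table.items():
--         result[ind] = num
--     return result
-- ===== SOURCE B (Python) =====
-- from typing import List
--
-- def arrayChange(nums: List[int], operations: List[List[int]]) -> List[int]:
--     # Compose the replacement chains: scanning operations in reverse,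
--     # final[old] is the ultimate value that old ends up as.
--     final = {}
--     for old, new in reversed(operations):
--         final[old] = final.get(new, new)
--     return [final.get(v, v) for v in nums]
-- ===== Notes on version B (the rewrite author's own statement) =====
-- stated objective: alternative
-- what changed: B drops A's value-to-index dict entirely: it composes the replacement chains by a single reverse scan of operations into a value-to-final-value map and then maps each original element through it; Pre_ excludes inputs with duplicate values in nums or an operation whose new value already exists (duplicate dict keys, where A's leftover zeros are accidental) and inputs where A raises (missing old, malformed operation).
-- outside the precondition, e.g. on arrayChange([5, 5], []): A returns [0, 5], B returns [5, 5]; on arrayChange([1, 2], [[1, 2]]): A returns [2, 0], B returns [2, 2]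
import Mathlib
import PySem

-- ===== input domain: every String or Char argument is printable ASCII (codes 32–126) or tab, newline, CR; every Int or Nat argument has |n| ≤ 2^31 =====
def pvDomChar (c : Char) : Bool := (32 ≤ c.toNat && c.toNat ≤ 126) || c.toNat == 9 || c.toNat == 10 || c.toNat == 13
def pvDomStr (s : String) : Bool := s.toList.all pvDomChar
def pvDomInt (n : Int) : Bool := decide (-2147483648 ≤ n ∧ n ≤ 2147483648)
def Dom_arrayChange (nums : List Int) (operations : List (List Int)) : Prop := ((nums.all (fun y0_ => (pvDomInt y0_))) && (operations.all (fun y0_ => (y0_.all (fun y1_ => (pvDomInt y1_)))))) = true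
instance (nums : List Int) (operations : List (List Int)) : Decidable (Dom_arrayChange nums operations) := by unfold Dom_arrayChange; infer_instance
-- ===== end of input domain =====

-- B replaces A's value-to-index dict with a reverse scan composing the replacement
-- chains into a value-to-final-value map, then maps nums through it (objective: alternative).

-- ===== PORT A =====
-- ind_table[new] = ind_table.pop(old)  (value fetched, old removed, new set)
def pvStepA (d : PySem.Dict Int Int) (op : List Int) : PySem.Dict Int Int :=
  let old := PySem.List.pyGetD op 0 0
  let new := PySem.List.pyGetD op 1 0
  (d.erase old).insert new (d.getD old 0)

def arrayChange (nums : List Int) (operations : List (List Int)) : List Int :=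
  -- ind_table = {val: i for i, val in enumerate(nums)}
  let indTable0 : PySem.Dict Int Int :=
    (PySem.List.enumerate nums 0).foldl (fun d p => d.insert p.2 p.1) PySem.Dict.empty
  -- for old, new in operations: ind_table[new] = ind_table.pop(old)
  let indTable := operations.foldl pvStepA indTable0
  -- result = [0] * len(nums); for num, ind in ind_table.items(): result[ind] = num
  indTable.items.foldl (fun res p => PySem.List.pySetD res p.2 p.1)
    (List.replicate nums.length (0 : Int))

-- ===== PORT B =====
-- final[old] = final.get(new, new)
def pvStepRev (d : PySem.Dict Int Int) (op : List Int) : PySem.Dict Int Int :=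
  let old := PySem.List.pyGetD op 0 0
  let new := PySem.List.pyGetD op 1 0
  d.insert old (d.getD new new)

def arrayChange_alt (nums : List Int) (operations : List (List Int)) : List Int :=
  -- final = {}; for old, new in reversed(operations): final[old] = final.get(new, new)
  let final : PySem.Dict Int Int := operations.reverse.foldl pvStepRev PySem.Dict.empty
  -- return [final.get(v, v) for v in nums]
  nums.map (fun v => final.getD v v)

-- ===== PRECONDITION & SPEC =====
-- s is the list of values currently in the table; each operation must be a pair
-- [old, new] with old present and new fresh (or equal to old).
def pvValidOps : List Int → List (List Int) → Bool
  | _, [] => true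
  | s, op :: rest =>
    match op with
    | [old, new] =>
      s.contains old && (new == old || !s.contains new) &&
        pvValidOps (s.filter (fun x => !(x == old)) ++ [new]) rest
    | _ => false

-- Pre_ excludes inputs with duplicate values in nums or an operation whose new value is
-- already present (duplicate dict keys, a corner on which A's leftover zeros from the
-- final rebuild pass are accidental), and inputs where A raises (old missing: KeyError;
-- an operation that is not a pair: ValueError on unpacking).
def Pre_arrayChange (nums : List Int) (operations : List (List Int)) : Prop :=
  nums.Nodup ∧ pvValidOps nums operations = true

instance (nums : List Int) (operations : List (List Int)) : Decidable (Pre_arrayChange nums operations) := by unfold Pre_arrayChange; infer_instance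

def pvWitness_arrayChange : List Int × List (List Int) := ([1, 2, 3], [[1, 4], [2, 5]])

def Spec_arrayChange (nums : List Int) (operations : List (List Int)) (out : List Int) : Prop := out = arrayChange_alt nums operations
instance (nums : List Int) (operations : List (List Int)) (out : List Int) : Decidable (Spec_arrayChange nums operations out) := by unfold Spec_arrayChange; infer_instance

-- ===== CLAIM (what is proved, stated in full; the proofs are below) =====
def Claim_equal_arrayChange : Prop := ∀ (nums : List Int) (operations : List (List Int)), Dom_arrayChange nums operations → Pre_arrayChange nums operations → Spec_arrayChange nums operations (arrayChange nums operations)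

-- ===== LEMMAS AND PROOFS =====

-- the value an initial element v is replaced by after applying ops in order
def pvChase (v : Int) (ops : List (List Int)) : Int :=
  ops.foldl (fun v op =>
    if v = PySem.List.pyGetD op 0 0 then PySem.List.pyGetD op 1 0 else v) v

-- the value stored at array position j according to the value→index table
def pvValAt (d : PySem.Dict Int Int) (j : Nat) : Int :=
  match d.items.find? (fun p => p.2 == (j : Int)) with
  | some p => p.1
  | none => 0

theorem pvSndUnique {items : List (Int × Int)} (h : (items.map (·.2)).Nodup)
    {p q : Int × Int} (hp : p ∈ items) (hq : q ∈ items) (hpq : p.2 = q.2) : p = q :=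
  List.inj_on_of_nodup_map h hp hq hpq

theorem pvFstUnique {items : List (Int × Int)} (h : (items.map (·.1)).Nodup)
    {p q : Int × Int} (hp : p ∈ items) (hq : q ∈ items) (hpq : p.1 = q.1) : p = q :=
  List.inj_on_of_nodup_map h hp hq hpq

theorem pvFindOfMem {items : List (Int × Int)} (h : (items.map (·.2)).Nodup)
    {v i : Int} (hm : (v, i) ∈ items) :
    items.find? (fun p => p.2 == i) = some (v, i) := by
  induction items with
  | nil => simp at hm
  | cons a tl ih =>
    rw [List.map_cons] at h
    obtain ⟨hnotin, hnd⟩ := List.nodup_cons.mp h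
    rcases List.mem_cons.1 hm with rfl | hm'
    · simp only [List.find?_cons]
      norm_num
    · have ha : ¬ (a.2 == i) = true := by
        intro hb
        exact hnotin (by simpa [beq_iff_eq.mp hb] using List.mem_map_of_mem (f := (·.2)) hm')
      rw [Bool.not_eq_true] at ha
      simp only [List.find?_cons, ha]
      exact ih hnd hm'

theorem pvFindFilter {α : Type} (p q : α → Bool) (l : List α)
    (h : ∀ x ∈ l, p x = true → q x = true) :
    (l.filter q).find? p = l.find? p := by
  induction l with
  | nil => rfl
  | cons a tl ih =>
    by_cases hq : q a = true
    · rw [List.filter_cons_of_pos hq]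
      by_cases hp : p a = true
      · simp only [List.find?_cons, hp]
      · rw [Bool.not_eq_true] at hp
        simp only [List.find?_cons, hp]
        exact ih (fun x hx => h x (List.mem_cons_of_mem _ hx))
    · rw [List.filter_cons_of_neg (by simpa using hq)]
      have hp : p a = false := Bool.not_eq_true _ |>.mp (fun hpa => hq (h a List.mem_cons_self hpa))
      simp only [List.find?_cons, hp]
      exact ih (fun x hx => h x (List.mem_cons_of_mem _ hx))

theorem pvWriteFoldLen (items : List (Int × Int)) : ∀ (base : List Int),
    (items.foldl (fun r p => PySem.List.pySetD r p.2 p.1) base).length = base.length := by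
  induction items with
  | nil => intro base; rfl
  | cons a tl ih =>
    intro base
    rw [List.foldl_cons, ih, PySem.List.length_pySetD]

theorem pvMapFstFilter (l : List (Int × Int)) (old : Int) :
    (l.filter (fun p => !(p.1 == old))).map (·.1) = (l.map (·.1)).filter (fun x => !(x == old)) := by
  induction l with
  | nil => rfl
  | cons a tl ih =>
    by_cases h : a.1 = old
    · simp [h, ih]
    · simp [h, ih]

theorem pvWriteFold (items : List (Int × Int)) : ∀ (base : List Int),
    (items.map (·.2)).Nodup →
    (∀ p ∈ items, 0 ≤ p.2 ∧ p.2 < (base.length : Int)) →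
    ∀ j : Nat, j < base.length →
    (items.foldl (fun r p => PySem.List.pySetD r p.2 p.1) base)[j]? =
      (match items.find? (fun p => p.2 == (j : Int)) with
       | some p => some p.1
       | none => base[j]?) := by
  induction items with
  | nil => intro base _ _ j hj; rfl
  | cons a tl ih =>
    intro base hnd hrange j hj
    rw [List.map_cons] at hnd
    obtain ⟨hnotin, hnd'⟩ := List.nodup_cons.mp hnd
    obtain ⟨ha0, haLt⟩ := hrange a List.mem_cons_self
    have hset : PySem.List.pySetD base a.2 a.1 = base.set a.2.toNat a.1 :=
      PySem.List.pySetD_of_nonneg base a.1 ha0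
    have hlen' : (PySem.List.pySetD base a.2 a.1).length = base.length :=
      PySem.List.length_pySetD base a.2 a.1
    have htoNatLt : a.2.toNat < base.length := by omega
    rw [List.foldl_cons]
    rw [ih (PySem.List.pySetD base a.2 a.1) hnd'
        (by intro p hp; rw [hlen']; exact hrange p (List.mem_cons_of_mem _ hp)) j (by omega)]
    by_cases hb : a.2 = (j : Int)
    · have hfind : tl.find? (fun p => p.2 == (j : Int)) = none := by
        rw [List.find?_eq_none]
        intro x hx hpx
        exact hnotin (by rw [hb, ← beq_iff_eq.mp hpx]; exact List.mem_map_of_mem hx)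
      have hcons : (a :: tl).find? (fun p => p.2 == (j : Int)) = some a := by
        simp only [List.find?_cons, hb]
        simp
      rw [hcons, hfind, hset, List.getElem?_set, if_pos (by omega), if_pos (by omega)]
    · have hb' : (a.2 == (j : Int)) = false := by simpa using hb
      have hcons : (a :: tl).find? (fun p => p.2 == (j : Int)) = tl.find? (fun p => p.2 == (j : Int)) := by
        simp only [List.find?_cons, hb']
      rw [hcons]
      have hbase : (PySem.List.pySetD base a.2 a.1)[j]? = base[j]? := by
        rw [hset, List.getElem?_set, if_neg (by omega)]
      rcases hf : tl.find? (fun p => p.2 == (j : Int)) with _ | p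
      · simp only [hf, hbase]
      · simp only [hf]

-- B side: the reverse-built map sends v to its chained final value
theorem pvBuildChase (ops : List (List Int)) : ∀ v : Int,
    (ops.reverse.foldl pvStepRev PySem.Dict.empty).getD v v = pvChase v ops := by
  induction ops with
  | nil =>
    intro v
    rfl
  | cons op rest ih =>
    intro v
    rw [List.reverse_cons, List.foldl_append, List.foldl_cons, List.foldl_nil]
    show (PySem.Dict.insert _ _ _).getD v v = _
    rw [PySem.Dict.getD_insert]
    unfold pvChase
    rw [List.foldl_cons]
    by_cases h : v = PySem.List.pyGetD op 0 0
    · rw [if_pos h, if_pos h]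
      exact ih (PySem.List.pyGetD op 1 0)
    · rw [if_neg h, if_neg h]
      exact ih v

-- A side: after processing ops, the array rebuilt from the table holds the chased values
theorem pvMainA (ops : List (List Int)) : ∀ (d : PySem.Dict Int Int) (n : Nat),
    pvValidOps d.keys ops = true →
    d.keys.Nodup →
    (d.items.map (·.2)).Nodup →
    (∀ p ∈ d.items, 0 ≤ p.2 ∧ p.2 < (n : Int)) →
    (∀ j : Nat, j < n → ∃ v, d.items.find? (fun p => p.2 == (j : Int)) = some (v, (j : Int))) →
    ∀ j : Nat, j < n →
    ((ops.foldl pvStepA d).items.foldl (fun r p => PySem.List.pySetD r p.2 p.1)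
        (List.replicate n (0 : Int)))[j]? = some (pvChase (pvValAt d j) ops) := by
  induction ops with
  | nil =>
    intro d n hv hknd hsnd hrange hsurj j hj
    rw [List.foldl_nil]
    obtain ⟨v, hfind⟩ := hsurj j hj
    rw [pvWriteFold d.items (List.replicate n 0) hsnd (by simpa using hrange) j (by simpa using hj)]
    rw [hfind]
    unfold pvChase pvValAt
    rw [hfind, List.foldl_nil]
  | cons op rest ih =>
    intro d n hv hknd hsnd hrange hsurj j hj
    rcases op with _ | ⟨old, t⟩
    · simp [pvValidOps] at hv
    rcases t with _ | ⟨new, t2⟩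
    · simp [pvValidOps] at hv
    rcases t2 with _ | ⟨x, t3⟩
    case cons.cons.cons => simp [pvValidOps] at hv
    simp only [pvValidOps, Bool.and_eq_true, Bool.or_eq_true, beq_iff_eq,
      Bool.not_eq_true'] at hv
    obtain ⟨⟨hcont, hfresh⟩, hrest⟩ := hv
    have hmemk : old ∈ d.keys := by simpa using hcont
    obtain ⟨i, hget⟩ : ∃ i, d.get? old = some i := by
      rcases hg : d.get? old with _ | v
      · exact absurd ((PySem.Dict.get?_eq_none_iff_not_mem_keys d old).mp hg)
          (by simp [hmemk])
      · exact ⟨v, rfl⟩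
    have hiD : d.getD old 0 = i := by
      show (d.get? old).getD 0 = i
      rw [hget]
      rfl
    have hmemi : (old, i) ∈ d.items := PySem.Dict.mem_items_of_get?_eq_some d hget
    obtain ⟨hi0, hiLt⟩ := hrange _ hmemi
    -- erased dict
    have herase : (d.erase old).items = d.items.filter (fun p => !(p.1 == old)) := rfl
    have hkeysnot : ∀ hne : ¬ new = old, d.keys.contains new = false → ∀ p ∈ d.items, ¬ (p.1 == new) = true := by
      intro hne hnc p hp hb
      have : p.1 ∈ d.keys := List.mem_map_of_mem hp
      rw [beq_iff_eq.mp hb] at this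
      simp [List.contains_eq_mem, this] at hnc
    have hcn : (d.erase old).contains new = false := by
      show ((d.erase old).items.any (fun p => p.1 == new)) = false
      rw [List.any_eq_false]
      intro p hp
      rw [herase] at hp
      obtain ⟨hpi, hpf⟩ := List.mem_filter.mp hp
      by_cases hne : new = old
      · subst hne
        simpa using hpf
      · rcases hfresh with h | hnc
        · exact absurd h hne
        · exact hkeysnot hne hnc p hpi
    have hd2 : pvStepA d [old, new] = (d.erase old).insert new i := by
      show (d.erase old).insert new (d.getD old 0) = _
      rw [hiD]
    have hd2items : (pvStepA d [old, new]).items =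
        d.items.filter (fun p => !(p.1 == old)) ++ [(new, i)] := by
      rw [hd2, PySem.Dict.items_insert_of_not_contains _ _ hcn, herase]
    have hkeys2 : (pvStepA d [old, new]).keys =
        d.keys.filter (fun x => !(x == old)) ++ [new] := by
      show ((pvStepA d [old, new]).items.map (·.1)) = _
      rw [hd2items, List.map_append, pvMapFstFilter]
      rfl
    have hrest' : pvValidOps (pvStepA d [old, new]).keys rest = true := by
      rw [hkeys2]; exact hrest
    -- key nodup
    have hnewnot : new ∉ d.keys.filter (fun x => !(x == old)) := by
      intro hmem
      obtain ⟨hmk, hbf⟩ := List.mem_filter.mp hmem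
      rcases hfresh with h | hnc
      · rw [h] at hbf; simp at hbf
      · simp [List.contains_eq_mem, hmk] at hnc
    have hknd2 : (pvStepA d [old, new]).keys.Nodup := by
      rw [hkeys2]
      refine List.Nodup.append (hknd.filter _) (List.nodup_singleton _) ?_
      intro a ha hb
      simp only [List.mem_singleton] at hb
      subst hb
      exact hnewnot ha
    -- snd nodup
    have hsub : (d.items.filter (fun p => !(p.1 == old))).Sublist d.items := List.filter_sublist
    have hsndE : ((d.items.filter (fun p => !(p.1 == old))).map (·.2)).Nodup :=
      (List.Sublist.map _ hsub).nodup hsnd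
    have hinotE : (i : Int) ∉ (d.items.filter (fun p => !(p.1 == old))).map (·.2) := by
      intro hmem
      obtain ⟨q, hq, hq2⟩ := List.mem_map.mp hmem
      obtain ⟨hqi, hqf⟩ := List.mem_filter.mp hq
      have : q = (old, i) := pvSndUnique hsnd hqi hmemi hq2
      rw [this] at hqf
      simp at hqf
    have hsnd2 : ((pvStepA d [old, new]).items.map (·.2)).Nodup := by
      rw [hd2items, List.map_append]
      refine List.Nodup.append hsndE (List.nodup_singleton _) ?_
      intro a ha hb
      simp only [List.map_cons, List.map_nil, List.mem_singleton] at hb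
      subst hb
      exact hinotE ha
    -- range
    have hrange2 : ∀ p ∈ (pvStepA d [old, new]).items, 0 ≤ p.2 ∧ p.2 < (n : Int) := by
      intro p hp
      rw [hd2items] at hp
      rcases List.mem_append.mp hp with h | h
      · exact hrange p (List.mem_of_mem_filter h)
      · simp at h
        rw [h]
        exact ⟨hi0, hiLt⟩
    -- the filter keeps exactly the entries whose index is not i
    have hkeyOldIdx : ∀ p ∈ d.items, p.1 = old → p.2 = i := by
      intro p hp hpk
      have : p = (old, i) := pvFstUnique hknd hp hmemi hpk
      rw [this]
    have hfindFilter : ∀ k : Nat, k < n → ¬ ((k : Int) = i) →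
        (d.items.filter (fun p => !(p.1 == old))).find? (fun p => p.2 == (k : Int)) =
          d.items.find? (fun p => p.2 == (k : Int)) := by
      intro k hk hki
      apply pvFindFilter
      intro p hp hpk
      have hpk' : p.2 = (k : Int) := beq_iff_eq.mp hpk
      by_contra hpf
      simp only [Bool.not_eq_true, Bool.not_eq_false'] at hpf
      exact hki (by rw [← hpk', hkeyOldIdx p hp (beq_iff_eq.mp hpf)])
    have hfilterAtI : (d.items.filter (fun p => !(p.1 == old))).find? (fun p => p.2 == (i : Int)) = none := by
      rw [List.find?_eq_none]
      intro p hp hpb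
      obtain ⟨hpi, hpf⟩ := List.mem_filter.mp hp
      have : p = (old, i) := pvSndUnique hsnd hpi hmemi (beq_iff_eq.mp hpb)
      rw [this] at hpf
      simp at hpf
    -- find in the new dict
    have hfind2 : ∀ k : Nat, k < n →
        (pvStepA d [old, new]).items.find? (fun p => p.2 == (k : Int)) =
          (if (k : Int) = i then some (new, i)
           else d.items.find? (fun p => p.2 == (k : Int))) := by
      intro k hk
      rw [hd2items, List.find?_append]
      by_cases hki : (k : Int) = i
      · rw [if_pos hki, hki, hfilterAtI]
        simp
      · rw [if_neg hki, hfindFilter k hk hki]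
        obtain ⟨v, hfv⟩ := hsurj k hk
        rw [hfv]
        rfl
    -- surjectivity preserved
    have hsurj2 : ∀ k : Nat, k < n → ∃ v, (pvStepA d [old, new]).items.find? (fun p => p.2 == (k : Int)) = some (v, (k : Int)) := by
      intro k hk
      rw [hfind2 k hk]
      by_cases hki : (k : Int) = i
      · rw [if_pos hki, hki]
        exact ⟨new, rfl⟩
      · rw [if_neg hki]
        exact hsurj k hk
    -- the chased value at position j steps as the chase does
    have hvalStep : pvValAt (pvStepA d [old, new]) j = (if pvValAt d j = old then new else pvValAt d j) := by
      obtain ⟨v, hfv⟩ := hsurj j hj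
      have hvj : pvValAt d j = v := by unfold pvValAt; rw [hfv]
      by_cases hji : (j : Int) = i
      · have : pvValAt d j = old := by
          have : (v, (j : Int)) = (old, i) :=
            pvSndUnique hsnd (List.mem_of_find?_eq_some hfv) hmemi (by simpa using hji)
          rw [hvj]
          exact congrArg Prod.fst this
        rw [if_pos this]
        unfold pvValAt
        rw [hfind2 j hj, if_pos hji]
      · have hvo : ¬ pvValAt d j = old := by
          intro hvo
          apply hji
          have : (v, (j : Int)) ∈ d.items := List.mem_of_find?_eq_some hfv
          have heq : (v, (j : Int)) = (old, i) :=
            pvFstUnique hknd this hmemi (by rw [← hvj]; exact hvo)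
          exact congrArg Prod.snd heq
        rw [if_neg hvo]
        unfold pvValAt
        rw [hfind2 j hj, if_neg hji, hfv]
    -- step and recurse
    rw [List.foldl_cons]
    have := ih (pvStepA d [old, new]) n hrest' hknd2 hsnd2 hrange2 hsurj2 j hj
    rw [this, hvalStep]
    unfold pvChase
    rw [List.foldl_cons]
    norm_num [PySem.List.pyGetD]

theorem pvInit (nums : List Int) (hnd : nums.Nodup) :
    ((PySem.List.enumerate nums 0).foldl (fun d p => d.insert p.2 p.1)
      (PySem.Dict.empty : PySem.Dict Int Int)).items
      = (PySem.List.enumerate nums 0).map (fun p => (p.2, p.1)) := by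
  have h := PySem.Dict.items_foldl_insert_fresh (PySem.List.enumerate nums 0)
    (fun p => p.2) (fun p => p.1) (PySem.Dict.empty : PySem.Dict Int Int)
    (fun a _ => PySem.Dict.contains_empty _)
    (by rw [PySem.List.map_snd_enumerate]; exact hnd)
  simpa using h

theorem pvFinal (nums : List Int) (operations : List (List Int))
    (hnd : nums.Nodup) (hval : pvValidOps nums operations = true) :
    arrayChange nums operations = arrayChange_alt nums operations := by
  have hitems := pvInit nums hnd
  generalize hd0 : ((PySem.List.enumerate nums 0).foldl (fun d p => d.insert p.2 p.1)
      (PySem.Dict.empty : PySem.Dict Int Int)) = d0 at *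
  have hkeys : d0.keys = nums := by
    show d0.items.map (fun x => x.1) = nums
    rw [hitems, List.map_map]
    exact PySem.List.map_snd_enumerate nums 0
  have hsnd0 : (d0.items.map (·.2)).Nodup := by
    rw [hitems, List.map_map]
    exact List.pairwise_map.mpr
      ((PySem.List.pairwise_lt_enumerate nums 0).imp (fun h => Int.ne_of_lt h))
  have hrange0 : ∀ p ∈ d0.items, 0 ≤ p.2 ∧ p.2 < (nums.length : Int) := by
    intro p hp
    rw [hitems] at hp
    obtain ⟨q, hq, rfl⟩ := List.mem_map.mp hp
    obtain ⟨k, hk, rfl⟩ := (PySem.List.mem_enumerate_iff nums 0 q).mp hq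
    simp
    omega
  have hfind0 : ∀ (j : Nat) (hj : j < nums.length),
      d0.items.find? (fun p => p.2 == (j : Int)) = some (nums[j]'hj, (j : Int)) := by
    intro j hj
    have hmem : ((nums[j]'hj, ((0 : Int) + (j : Nat)))) ∈ d0.items := by
      rw [hitems]
      exact List.mem_map.mpr ⟨((0 : Int) + j, nums[j]'hj),
        (PySem.List.mem_enumerate_iff nums 0 _).mpr ⟨j, hj, rfl⟩, rfl⟩
    have h0j : ((0 : Int) + (j : Int)) = (j : Int) := by omega
    rw [h0j] at hmem
    exact pvFindOfMem hsnd0 hmem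
  have hsurj0 : ∀ j : Nat, j < nums.length → ∃ v, d0.items.find? (fun p => p.2 == (j : Int)) = some (v, (j : Int)) := by
    intro j hj
    exact ⟨nums[j]'hj, hfind0 j hj⟩
  apply List.ext_getElem?
  intro j
  by_cases hj : j < nums.length
  · have hA := pvMainA operations d0 nums.length
      (by rw [hkeys]; exact hval) (by rw [hkeys]; exact hnd) hsnd0 hrange0 hsurj0 j hj
    have hvj : pvValAt d0 j = nums[j] := by
      unfold pvValAt
      rw [hfind0 j hj]
    show (arrayChange nums operations)[j]? = (arrayChange_alt nums operations)[j]?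
    have hLHS : (arrayChange nums operations)[j]? = some (pvChase nums[j] operations) := by
      simp only [arrayChange, hd0]
      rw [hA, hvj]
    rw [hLHS]
    simp only [arrayChange_alt]
    rw [List.getElem?_map, List.getElem?_eq_getElem hj]
    simp only [Option.map_some]
    rw [pvBuildChase]
  · show (arrayChange nums operations)[j]? = (arrayChange_alt nums operations)[j]?
    rw [List.getElem?_eq_none, List.getElem?_eq_none]
    · simp only [arrayChange_alt, List.length_map]
      omega
    · simp only [arrayChange, hd0]
      rw [pvWriteFoldLen]
      simp
      omega

-- ===== VERDICT (by name: the statement is the Claim_ definition above) =====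
theorem arrayChange_spec : Claim_equal_arrayChange := by
  intro nums operations _ hpre
  unfold Spec_arrayChange
  exact pvFinal nums operations hpre.1 hpre.2
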